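-- pv_equiv track=rewrite | github.com/vedang-rocket/Rocket-Support | engine/rkt_engine.py | _build_files_changed
-- ===== SOURCE A (Python) =====
-- from typing import Dict, Any, List, Optional, Tuple
--
-- def _build_files_changed(findings: List[Dict], fs_issues: List[Dict]) -> str:
--     files = {}
--     for f in findings:
--         path = f.get("path", "")
--         rule = f.get("check_id", "").split(".")[-1]
--         if path:
--             files[path] = files.get(path, []) + [rule]
--     lines = [f"- {path}: {', '.join(rules)}" for path, rules in files.items()]
--     return "\n".join(lines) if lines else "- (file-system level change required)"
-- ===== SOURCE B (Python) =====
-- def _build_files_changed(findings, fs_issues):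
--     # B: index-then-rescan decomposition -- first the distinct non-empty paths in
--     # first-appearance order, then one rescan of findings per path to collect its rules.
--     paths = [f.get("path", "") for f in findings]
--     distinct = dict.fromkeys(p for p in paths if p)
--     lines = ["- {}: {}".format(p, ", ".join(
--         f.get("check_id", "").split(".")[-1]
--         for f in findings if f.get("path", "") == p)) for p in distinct]
--     return "\n".join(lines) if lines else "- (file-system level change required)"
-- ===== Notes on version B (the rewrite author's own statement) =====
-- stated objective: alternative
-- what changed: B replaces A's single-pass dict-of-lists grouping with a two-phase traversal: build the ordered list of distinct non-empty paths with dict.fromkeys, then rescan findings once per path to collect its rules.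
import Mathlib
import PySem

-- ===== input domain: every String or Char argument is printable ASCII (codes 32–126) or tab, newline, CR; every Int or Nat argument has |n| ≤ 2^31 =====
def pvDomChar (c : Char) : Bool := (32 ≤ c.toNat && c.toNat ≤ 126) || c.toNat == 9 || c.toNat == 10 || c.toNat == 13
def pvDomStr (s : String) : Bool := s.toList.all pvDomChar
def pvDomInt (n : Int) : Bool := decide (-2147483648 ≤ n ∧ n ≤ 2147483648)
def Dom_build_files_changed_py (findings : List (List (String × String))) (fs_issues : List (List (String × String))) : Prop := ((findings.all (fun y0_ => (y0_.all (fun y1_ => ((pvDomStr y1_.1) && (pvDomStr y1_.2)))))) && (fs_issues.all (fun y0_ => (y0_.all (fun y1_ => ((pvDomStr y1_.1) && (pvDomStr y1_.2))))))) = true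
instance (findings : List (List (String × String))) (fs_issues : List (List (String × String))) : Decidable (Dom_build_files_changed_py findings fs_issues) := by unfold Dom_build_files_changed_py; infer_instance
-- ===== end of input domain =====

-- B rebuilds the same report by listing the distinct non-empty paths first and then rescanning
-- the findings once per path (index-then-rescan), instead of A's single-pass dict-of-lists grouping;
-- objective: alternative decomposition, same cost.


-- ===== PORT A =====
-- shared helpers: both Pythons use the very same subexpressions f.get("path",""),
-- f.get("check_id","").split(".")[-1] and the "- {path}: {rules}" line format
def pvGet (f : List (String × String)) (k d : String) : String := (List.lookup k f).getD d

def pathOf (f : List (String × String)) : String := pvGet f "path" ""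

-- f.get("check_id","").split(".")[-1]; split("."): sep is the literal ".", never "", and the
-- result of str.split is always non-empty, so the getD defaults can never fire
def ruleOf (f : List (String × String)) : String :=
  PySem.List.pyGetD ((PySem.Str.split? (pvGet f "check_id" "") ".").getD []) (-1) ""

def lineOf (p : String) (rules : List String) : String :=
  "- " ++ p ++ ": " ++ PySem.Str.join ", " rules

def build_files_changed_py (findings : List (List (String × String))) (fs_issues : List (List (String × String))) : String :=
  let files : PySem.Dict String (List String) :=
    findings.foldl (fun files f =>
      if pathOf f ≠ "" then files.insert (pathOf f) (files.getD (pathOf f) [] ++ [ruleOf f])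
      else files) PySem.Dict.empty
  let lines := files.items.map (fun pr => lineOf pr.1 pr.2)
  if lines ≠ [] then PySem.Str.join "\n" lines else "- (file-system level change required)"

-- ===== PORT B =====
def build_files_changed_py_alt (findings : List (List (String × String))) (fs_issues : List (List (String × String))) : String :=
  let distinct := PySem.List.dedup ((findings.map pathOf).filter (fun p => p ≠ ""))
  let lines := distinct.map (fun p =>
    lineOf p ((findings.filter (fun f => pathOf f == p)).map ruleOf))
  if lines ≠ [] then PySem.Str.join "\n" lines else "- (file-system level change required)"

-- ===== PRECONDITION & SPEC =====
def Spec_build_files_changed_py (findings : List (List (String × String))) (fs_issues : List (List (String × String))) (out : String) : Prop := out = build_files_changed_py_alt findings fs_issues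
instance (findings : List (List (String × String))) (fs_issues : List (List (String × String))) (out : String) : Decidable (Spec_build_files_changed_py findings fs_issues out) := by unfold Spec_build_files_changed_py; infer_instance

-- ===== CLAIM (what is proved, stated in full; the proofs are below) =====
def Claim_equal_build_files_changed_py : Prop := ∀ (findings : List (List (String × String))) (fs_issues : List (List (String × String))), Dom_build_files_changed_py findings fs_issues → Spec_build_files_changed_py findings fs_issues (build_files_changed_py findings fs_issues)

-- ===== LEMMAS AND PROOFS =====

lemma files_eq (findings : List (List (String × String))) :
    (findings.foldl (fun files f =>
      if pathOf f ≠ "" then files.insert (pathOf f) (files.getD (pathOf f) [] ++ [ruleOf f])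
      else files) (PySem.Dict.empty : PySem.Dict String (List String)))
    = ((findings.filter (fun f => decide (pathOf f ≠ ""))).map (fun f => (pathOf f, ruleOf f))).foldl
        (fun d p => d.modify p.1 [] (· ++ [p.2])) PySem.Dict.empty := by
  rw [List.foldl_map]
  simp only [PySem.Dict.modify]
  exact PySem.List.foldl_ite_eq_foldl_filter _ _ _ _

lemma items_files_eq (findings : List (List (String × String))) :
    (findings.foldl (fun files f =>
      if pathOf f ≠ "" then files.insert (pathOf f) (files.getD (pathOf f) [] ++ [ruleOf f])
      else files) (PySem.Dict.empty : PySem.Dict String (List String))).items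
    = (PySem.List.dedup ((findings.map pathOf).filter (fun p => p ≠ ""))).map
        (fun p => (p, (findings.filter (fun f => pathOf f == p)).map ruleOf)) := by
  rw [files_eq]
  have hmap : (findings.map pathOf).filter (fun p => p ≠ "")
      = (findings.filter (fun f => decide (pathOf f ≠ ""))).map pathOf := by
    rw [List.filter_map]; rfl
  have hnd := PySem.Dict.nodup_keys_foldl_modify_key
      ((findings.filter (fun f => decide (pathOf f ≠ ""))).map (fun f => (pathOf f, ruleOf f)))
      Prod.fst [] (fun _ p => (· ++ [p.2])) PySem.Dict.empty PySem.Dict.nodup_keys_empty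
  rw [PySem.Dict.items_eq_map_keys _ hnd []]
  rw [PySem.Dict.keys_foldl_modify_key]
  have hkeys : PySem.Set.update (PySem.Dict.empty : PySem.Dict String (List String)).keys
      (((findings.filter (fun f => decide (pathOf f ≠ ""))).map (fun f => (pathOf f, ruleOf f))).map Prod.fst)
      = PySem.List.dedup ((findings.map pathOf).filter (fun p => p ≠ "")) := by
    rw [hmap, List.map_map, PySem.List.dedup_eq_ofList, PySem.Set.ofList_eq_foldl]; rfl
  rw [hkeys]
  apply List.map_congr_left
  intro k hk
  have hkne : k ≠ "" := by
    rw [PySem.List.dedup_eq_ofList, PySem.Set.mem_ofList, List.mem_filter] at hk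
    simpa using hk.2
  have hgetD := PySem.Dict.getD_foldl_modify_append
      ((findings.filter (fun f => decide (pathOf f ≠ ""))).map (fun f => (pathOf f, ruleOf f)))
      (PySem.Dict.empty : PySem.Dict String (List String)) k
  rw [hgetD, PySem.Dict.getD_empty, List.nil_append, List.filter_map, List.map_map]
  have hfilt : List.filter ((fun p => p.1 == k) ∘ fun f => (pathOf f, ruleOf f))
        (findings.filter (fun f => decide (pathOf f ≠ "")))
      = findings.filter (fun f => pathOf f == k) := by
    rw [List.filter_filter]
    apply List.filter_congr
    intro f _
    by_cases h : pathOf f == k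
    · have hne : pathOf f ≠ "" := by
        intro he; exact hkne (by rw [← eq_of_beq h, he])
      simp [Function.comp, h, hne]
    · simp [Function.comp] at h ⊢
      simp [h]
  rw [hfilt]
  rfl

-- ===== VERDICT (by name: the statement is the Claim_ definition above) =====
theorem build_files_changed_py_spec : Claim_equal_build_files_changed_py := by
  intro findings fs_issues _
  show build_files_changed_py findings fs_issues = build_files_changed_py_alt findings fs_issues
  simp only [build_files_changed_py, build_files_changed_py_alt]
  rw [items_files_eq, List.map_map]
  rfl
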